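-- pv_equiv track=rewrite | github.com/yaneurao/Pytra | src/toolchain/compile/east3_opt_passes/any_annotation_prohibition_pass.py | _annotation_contains_any
-- ===== SOURCE A (Python) =====
-- def _annotation_contains_any(type_str: str) -> bool:
--     """Return True if *type_str* contains ``Any`` as a standalone type token.
--
--     Examples::
--
--         _annotation_contains_any("Any")             # True
--         _annotation_contains_any("list[Any]")       # True
--         _annotation_contains_any("dict[str, Any]")  # True
--         _annotation_contains_any("AnyFoo")          # False
--         _annotation_contains_any("int")             # False
--     """
--     if not type_str:
--         return False
--     cur = ""
--     for ch in type_str: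
--         if ch in "[], |":
--             if cur == "Any":
--                 return True
--             cur = ""
--         else:
--             cur += ch
--     return cur == "Any"
-- ===== SOURCE B (Python) =====
-- def _annotation_contains_any(type_str: str) -> bool:
--     """Substring-occurrence scan: True iff the literal "Any" occurs at some
--     index flanked on both sides by a delimiter or the string edge -- no token
--     is ever built, each position is judged on its own."""
--     delims = "[], |"
--     n = len(type_str)
--     for i in range(n):
--         if (type_str.startswith("Any", i)
--                 and (i == 0 or type_str[i - 1] in delims)
--                 and (i + 3 == n or (i + 3 < n and type_str[i + 3] in delims))):
--             return True
--     return False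
-- ===== Notes on version B (the rewrite author's own statement) =====
-- stated objective: alternative
-- what changed: Instead of A's tokenizer (accumulate characters into the current token, reset on delimiters, compare each finished token to "Any"), B never builds tokens: it scans every index and tests whether the literal substring "Any" starts there flanked on both sides by a delimiter or the string edge.
import Mathlib
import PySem

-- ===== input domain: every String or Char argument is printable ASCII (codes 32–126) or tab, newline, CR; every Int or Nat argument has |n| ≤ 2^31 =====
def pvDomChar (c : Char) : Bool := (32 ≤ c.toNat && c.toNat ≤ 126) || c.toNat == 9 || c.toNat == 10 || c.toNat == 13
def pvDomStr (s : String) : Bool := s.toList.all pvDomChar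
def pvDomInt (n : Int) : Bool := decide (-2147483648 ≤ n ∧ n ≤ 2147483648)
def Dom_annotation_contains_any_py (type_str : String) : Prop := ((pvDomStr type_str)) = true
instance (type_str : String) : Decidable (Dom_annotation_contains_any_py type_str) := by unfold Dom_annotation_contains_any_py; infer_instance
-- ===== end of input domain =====

-- B replaces A's tokenizer (accumulate-and-reset, compare each token) with a per-position
-- boundary-flanked substring-occurrence scan; objective: alternative algorithm, same cost.

-- the delimiter characters of the Python string "[], |"
def pvDelims : List Char := ['[', ']', ',', ' ', '|']

-- ===== PORT A =====
-- the 'for ch in type_str' loop with accumulator cur (early return on a delimiter after "Any")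
def pvLoopA : List Char → List Char → Bool
  | cur, [] => cur == ['A', 'n', 'y']
  | cur, c :: cs =>
    if pvDelims.contains c then
      (if cur == ['A', 'n', 'y'] then true else pvLoopA [] cs)
    else pvLoopA (cur ++ [c]) cs

def annotation_contains_any_py (type_str : String) : Bool :=
  if type_str = "" then false
  else pvLoopA [] type_str.toList

-- ===== PORT B =====
-- bounded test at index i: type_str.startswith("Any", i), left edge-or-delimiter at i-1,
-- right edge-or-delimiter at i+3 (the i+3 < n guard keeps the lookup in range, as in Python)
def pvBoundedAt (l : List Char) (i : Nat) : Bool :=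
  ((l.drop i).take 3 == ['A', 'n', 'y'])
    && ((i == 0) || pvDelims.contains (l.getD (i - 1) 'A'))
    && ((i + 3 == l.length) || ((i + 3 < l.length) && pvDelims.contains (l.getD (i + 3) 'A')))

-- the 'for i in range(n)' loop with early return
def pvScanIdx (l : List Char) (i : Nat) : Bool :=
  if i < l.length then
    (if pvBoundedAt l i then true else pvScanIdx l (i + 1))
  else false
termination_by l.length - i
decreasing_by omega

def annotation_contains_any_py_alt (type_str : String) : Bool :=
  pvScanIdx type_str.toList 0

-- ===== PRECONDITION & SPEC =====
def Spec_annotation_contains_any_py (type_str : String) (out : Bool) : Prop := out = annotation_contains_any_py_alt type_str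
instance (type_str : String) (out : Bool) : Decidable (Spec_annotation_contains_any_py type_str out) := by unfold Spec_annotation_contains_any_py; infer_instance

-- ===== CLAIM (what is proved, stated in full; the proofs are below) =====
def Claim_equal_annotation_contains_any_py : Prop := ∀ (type_str : String), Dom_annotation_contains_any_py type_str → Spec_annotation_contains_any_py type_str (annotation_contains_any_py type_str)

-- ===== LEMMAS AND PROOFS =====

-- proof helpers: a suffix-and-previous-character view of B's index scan
def pvBoundary (prev : Option Char) : Bool :=
  match prev with
  | none => true
  | some p => pvDelims.contains p

def pvBounded (s : List Char) (prev : Option Char) : Bool :=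
  pvBoundary prev && (s.take 3 == ['A', 'n', 'y'])
    && ((s.length == 3) || pvDelims.contains (s.drop 3).headI)

def pvScanB : List Char → Option Char → Bool
  | [], _ => false
  | c :: cs, prev => if pvBounded (c :: cs) prev then true else pvScanB cs (some c)

-- the bounded test at index i, seen from the suffix l.drop i
lemma pvBoundedAt_eq_bounded (l : List Char) (i : Nat) (prev : Option Char)
    (hi : i < l.length)
    (h : pvBoundary prev = ((i == 0) || pvDelims.contains (l.getD (i - 1) 'A'))) :
    pvBoundedAt l i = pvBounded (l.drop i) prev := by
  have hlen : ((l.drop i).length == 3) = ((i + 3 == l.length)) := by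
    rw [Bool.eq_iff_iff]
    simp only [List.length_drop, beq_iff_eq]
    omega
  have hright : pvDelims.contains ((l.drop i).drop 3).headI
      = (((i + 3 < l.length : Bool)) && pvDelims.contains (l.getD (i + 3) 'A')) := by
    rw [List.drop_drop]
    by_cases h4 : i + 3 < l.length
    · rw [List.drop_eq_getElem_cons h4, List.headI_cons, List.getD_eq_getElem _ _ h4]
      simp [h4]
    · rw [List.drop_eq_nil_of_le (by omega)]
      simp only [List.headI_nil]
      simp [h4]
      decide
  unfold pvBounded pvBoundedAt
  rw [← h, hlen, hright]
  cases pvBoundary prev <;> cases ((l.drop i).take 3 == ['A', 'n', 'y']) <;>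
    cases ((i + 3 == l.length) || (((i + 3 < l.length : Bool)) && pvDelims.contains (l.getD (i + 3) 'A'))) <;> rfl

-- B's index scan equals the suffix scan, prev being the character before position i
lemma pvScanIdx_eq_scanB (l : List Char) :
    ∀ (i : Nat) (prev : Option Char),
      pvBoundary prev = ((i == 0) || pvDelims.contains (l.getD (i - 1) 'A')) →
      pvScanIdx l i = pvScanB (l.drop i) prev := by
  suffices H : ∀ (k i : Nat) (prev : Option Char), l.length - i ≤ k →
      pvBoundary prev = ((i == 0) || pvDelims.contains (l.getD (i - 1) 'A')) →
      pvScanIdx l i = pvScanB (l.drop i) prev by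
    exact fun i prev h => H (l.length - i) i prev le_rfl h
  intro k
  induction k with
  | zero =>
    intro i prev hk _
    rw [pvScanIdx, List.drop_eq_nil_of_le (by omega)]
    simp [pvScanB]
    omega
  | succ k ih =>
    intro i prev hk h
    rw [pvScanIdx]
    by_cases hi : i < l.length
    · have hstep : pvScanB (l.drop i) prev
          = if pvBounded (l.drop i) prev then true else pvScanB (l.drop (i + 1)) (some l[i]) := by
        rw [List.drop_eq_getElem_cons hi]
        rfl
      rw [if_pos hi, hstep, pvBoundedAt_eq_bounded l i prev hi h]
      cases pvBounded (l.drop i) prev with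
      | true => simp
      | false =>
        simp only [Bool.false_eq_true, if_false]
        exact ih (i + 1) (some l[i]) (by omega)
          (by simp [pvBoundary, List.getElem?_eq_getElem hi])
    · rw [if_neg hi, List.drop_eq_nil_of_le (by omega)]
      rfl

-- the token A is currently building, completed by the upcoming non-delimiter run, equals "Any"
def pvPending (cur cs : List Char) : Bool :=
  (cur ++ cs.takeWhile (fun c => !pvDelims.contains c)) == ['A', 'n', 'y']

-- the first (boundary-started) token of l is exactly "Any" iff B's start-of-s test fires
lemma pvPending_nil_eq_bounded_core (l : List Char) :
    pvPending [] l =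
      ((l.take 3 == ['A', 'n', 'y'])
        && ((l.length == 3) || pvDelims.contains (l.drop 3).headI)) := by
  match l with
  | [] => decide
  | [a] =>
    by_cases ha : a ∈ pvDelims <;>
      simp [pvPending, List.takeWhile, ha]
  | [a, b] =>
    by_cases ha : a ∈ pvDelims <;> by_cases hb : b ∈ pvDelims <;>
      simp [pvPending, List.takeWhile, ha, hb]
  | a :: b :: c :: rest =>
    by_cases ha : a ∈ pvDelims <;> by_cases hb : b ∈ pvDelims <;> by_cases hc : c ∈ pvDelims <;>
      simp [pvPending, List.takeWhile, ha, hb, hc] <;>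
      first
        | (intro rfl rfl rfl; simp_all [pvDelims])
        | (cases rest with
           | nil => simp
           | cons d ds =>
             by_cases hd : d ∈ pvDelims <;>
               simp [List.takeWhile, hd])

-- if the first token is "Any" and the left boundary holds, B's scan fires
lemma pvScanB_of_pending (l : List Char) (prev : Option Char)
    (hb : pvBoundary prev = true) (hp : pvPending [] l = true) :
    pvScanB l prev = true := by
  cases l with
  | nil => simp [pvPending, List.takeWhile] at hp
  | cons c cs =>
    rw [pvPending_nil_eq_bounded_core] at hp
    simp only [pvScanB, pvBounded, hb, Bool.true_and, hp, if_true]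

lemma pvLoopA_eq_scan (cs : List Char) :
    ∀ (cur : List Char) (prev : Option Char),
      (pvBoundary prev = true → cur = []) →
      pvLoopA cur cs = (pvPending cur cs || pvScanB cs prev) := by
  induction cs with
  | nil =>
    intro cur prev _
    simp [pvLoopA, pvScanB, pvPending, List.takeWhile]
  | cons c cs ih =>
    intro cur prev h
    by_cases hc : c ∈ pvDelims
    · have hpend : pvPending cur (c :: cs) = (cur == ['A', 'n', 'y']) := by
        simp [pvPending, List.takeWhile, hc]
      have hbnd : pvBounded (c :: cs) prev = false := by
        have hcA : c ≠ 'A' := by rintro rfl; simp [pvDelims] at hc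
        simp [pvBounded, hcA]
      simp only [pvLoopA, hc, decide_true, List.contains_eq_mem, if_true, pvScanB, hbnd,
        Bool.false_eq_true, if_false, hpend]
      cases hcur : cur == ['A', 'n', 'y'] with
      | true => simp
      | false =>
        simp only [Bool.false_or, if_false, Bool.false_eq_true]
        rw [ih [] (some c) (fun _ => rfl)]
        cases hp : pvPending [] cs with
        | false => simp
        | true => simp [pvScanB_of_pending cs (some c) (by simpa [pvBoundary] using hc) hp]
    · have hpend : pvPending cur (c :: cs) = pvPending (cur ++ [c]) cs := by
        simp [pvPending, List.takeWhile, hc]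
      simp only [pvLoopA, List.contains_eq_mem, hc, decide_false, Bool.false_eq_true, if_false]
      rw [ih (cur ++ [c]) (some c) (by simp [pvBoundary, hc]), hpend]
      simp only [pvScanB]
      cases hbnd : pvBounded (c :: cs) prev with
      | false => simp
      | true =>
        have hb : pvBoundary prev = true := by
          cases hB : pvBoundary prev with
          | true => rfl
          | false => simp [pvBounded, hB] at hbnd
        have hcur0 : cur = [] := h hb
        have : pvPending (cur ++ [c]) cs = true := by
          rw [← hpend, hcur0, pvPending_nil_eq_bounded_core]
          simpa [pvBounded, hb] using hbnd
        simp [this]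

-- ===== VERDICT (by name: the statement is the Claim_ definition above) =====
theorem annotation_contains_any_py_spec : Claim_equal_annotation_contains_any_py := by
  intro s _
  show annotation_contains_any_py s = annotation_contains_any_py_alt s
  unfold annotation_contains_any_py annotation_contains_any_py_alt
  rw [pvScanIdx_eq_scanB s.toList 0 none (by simp [pvBoundary]), List.drop_zero]
  by_cases hs : s = ""
  · subst hs; decide
  · rw [if_neg hs, pvLoopA_eq_scan _ [] none (fun _ => rfl)]
    cases hp : pvPending [] s.toList with
    | false => simp
    | true => simp [pvScanB_of_pending _ none rfl hp]
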